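-- pv_equiv track=rewrite | github.com/InSiDeR-de/prg-basics | test2mocktest/p10.py | f
-- ===== SOURCE A (Python) =====
-- def f(array):
--     # Find the minimum value in the 2D array
--     min_val = float('inf')
--     min_row = -1
--     min_col = -1
--
--     for i in range(len(array)):
--         for j in range(len(array[i])):
--             if array[i][j] < min_val:
--                 min_val = array[i][j]
--                 min_row = i
--                 min_col = j
--
--     # Check if row number equals column number (0-indexed)
--     return min_row == min_col
-- ===== SOURCE B (Python) =====
-- def f(array):
--     # B: compute the global minimum of the flattened array in one builtin pass,
--     # then locate its first row-major occurrence and test whether it is on the diagonal.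
--     vals = [x for row in array for x in row]
--     if not vals:
--         return True
--     m = min(vals)
--     for i, row in enumerate(array):
--         if m in row:
--             return i == row.index(m)
-- ===== Notes on version B (the rewrite author's own statement) =====
-- stated objective: simpler
-- what changed: A tracks a running (min_val, min_row, min_col) triple with an explicit strict-< update inside nested index loops; B instead flattens the array, takes the builtin min, then returns i == row.index(m) at the first row containing it (empty arrays give True, matching A's -1 == -1).
import Mathlib
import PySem

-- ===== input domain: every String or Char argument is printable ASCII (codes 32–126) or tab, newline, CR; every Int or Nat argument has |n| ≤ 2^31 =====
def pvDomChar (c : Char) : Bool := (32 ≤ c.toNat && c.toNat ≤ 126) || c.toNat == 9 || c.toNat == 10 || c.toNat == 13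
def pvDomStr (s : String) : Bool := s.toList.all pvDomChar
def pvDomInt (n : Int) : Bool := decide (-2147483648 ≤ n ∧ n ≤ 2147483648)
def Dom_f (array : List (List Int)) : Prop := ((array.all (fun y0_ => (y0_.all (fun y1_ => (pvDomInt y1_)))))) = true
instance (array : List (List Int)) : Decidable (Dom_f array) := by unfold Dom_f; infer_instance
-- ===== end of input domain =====

-- B replaces A's hand-rolled running-min/argmin tracking by min-of-flattened followed by a
-- first-occurrence search (objective: simpler decomposition; same asymptotic cost).

-- ===== PORT A =====
-- A: nested loops tracking (min_val, min_row, min_col); min_val = inf is modelled by Option.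
def f (array : List (List Int)) : Bool :=
  let st := (PySem.List.enumerate array 0).foldl
    (fun st p =>
      (PySem.List.enumerate p.2 0).foldl
        (fun st q =>
          match st.1 with
          | none => (some q.2, p.1, q.1)
          | some m => if q.2 < m then (some q.2, p.1, q.1) else st)
        st)
    ((none : Option Int), (-1 : Int), (-1 : Int))
  st.2.1 == st.2.2

-- ===== PORT B =====
-- 'for i, row in enumerate(array): if m in row: return i == row.index(m)'
-- (row.index is guarded by 'm in row', so the getD default is never used)
def findRow (m : Int) : List (Int × List Int) → Bool
  | [] => true
  | p :: rest =>
      if m ∈ p.2 then p.1 == (((PySem.List.index? p.2 m).getD 0 : Nat) : Int)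
      else findRow m rest

def f_alt (array : List (List Int)) : Bool :=
  let vals := array.flatMap id
  match PySem.List.min? vals (fun x => x) with
  | none => true
  | some m => findRow m (PySem.List.enumerate array 0)

-- ===== PRECONDITION & SPEC =====
def Spec_f (array : List (List Int)) (out : Bool) : Prop := out = f_alt array
instance (array : List (List Int)) (out : Bool) : Decidable (Spec_f array out) := by unfold Spec_f; infer_instance

-- ===== CLAIM (what is proved, stated in full; the proofs are below) =====
def Claim_equal_f : Prop := ∀ (array : List (List Int)), Dom_f array → Spec_f array (f array)

-- ===== LEMMAS AND PROOFS =====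

-- ((row, col), value) triples in row-major order
def pvStep1 (q p : (Int × Int) × Int) : (Int × Int) × Int := if p.2 < q.2 then p else q

def pvPs (array : List (List Int)) : List ((Int × Int) × Int) :=
  (PySem.List.enumerate array 0).flatMap
    (fun r => (PySem.List.enumerate r.2 0).map (fun c => ((r.1, c.1), c.2)))

def pvStepA (st : Option Int × Int × Int) (p : (Int × Int) × Int) : Option Int × Int × Int :=
  match st.1 with
  | none => (some p.2, p.1.1, p.1.2)
  | some m => if p.2 < m then (some p.2, p.1.1, p.1.2) else st

lemma pvFoldA_encode (l : List ((Int × Int) × Int)) (q : (Int × Int) × Int) :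
    l.foldl pvStepA (some q.2, q.1.1, q.1.2) =
      ((some (l.foldl pvStep1 q).2, (l.foldl pvStep1 q).1.1, (l.foldl pvStep1 q).1.2)) := by
  induction l generalizing q with
  | nil => rfl
  | cons p l ih =>
      simp only [List.foldl_cons, pvStepA, pvStep1]
      by_cases h : p.2 < q.2 <;> simp [h, ih]

lemma pvF_eq (array : List (List Int)) :
    f array = (match pvPs array with
      | [] => true
      | q :: l => (l.foldl pvStep1 q).1.1 == (l.foldl pvStep1 q).1.2) := by
  have hflat : f array =
      (let st := (pvPs array).foldl pvStepA ((none : Option Int), (-1 : Int), (-1 : Int))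
       st.2.1 == st.2.2) := by
    simp only [f, pvPs, pvStepA, List.foldl_flatMap, List.foldl_map]
  rw [hflat]
  cases hps : pvPs array with
  | nil => rfl
  | cons q l =>
      simp only [List.foldl_cons]
      have h0 : pvStepA ((none : Option Int), (-1 : Int), (-1 : Int)) q
          = (some q.2, q.1.1, q.1.2) := rfl
      rw [h0, pvFoldA_encode]

def pvVmin (a : Int) (l : List ((Int × Int) × Int)) : Int := l.foldl (fun a p => min a p.2) a

lemma pvVmin_le (a : Int) (l : List ((Int × Int) × Int)) : pvVmin a l ≤ a := by
  induction l generalizing a with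
  | nil => simp [pvVmin]
  | cons p l ih =>
      simp only [pvVmin, List.foldl_cons] at *
      exact le_trans (ih _) (min_le_left _ _)

lemma pvFind_char (l : List ((Int × Int) × Int)) (q : (Int × Int) × Int) :
    (q :: l).find? (fun p => p.2 == pvVmin q.2 l) = some (l.foldl pvStep1 q) := by
  induction l generalizing q with
  | nil => simp [pvVmin]
  | cons p l ih =>
      have hm : pvVmin q.2 (p :: l) = pvVmin (pvStep1 q p).2 l := by
        simp only [pvVmin, List.foldl_cons]
        congr 1
        simp only [pvStep1]
        split <;> omega
      have hle : pvVmin (pvStep1 q p).2 l ≤ (pvStep1 q p).2 := pvVmin_le _ _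
      rw [hm, List.foldl_cons]
      have ih' := ih (pvStep1 q p)
      by_cases h : p.2 < q.2
      · have hq1 : pvStep1 q p = p := by simp [pvStep1, h]
        rw [hq1] at ih' hle ⊢
        rw [List.find?_cons_of_neg]
        · exact ih'
        · simp only [beq_iff_eq]; omega
      · have hq1 : pvStep1 q p = q := by simp [pvStep1, h]
        rw [hq1] at ih' hle ⊢
        by_cases hq : q.2 = pvVmin q.2 l
        · have h1 : (q :: l).find? (fun r => r.2 == pvVmin q.2 l) = some q :=
            List.find?_cons_of_pos (by simp [← hq])
          have hfold : l.foldl pvStep1 q = q := by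
            rw [h1] at ih'; exact (Option.some.inj ih').symm
          rw [List.find?_cons_of_pos (by simp [← hq]), hfold]
        · rw [List.find?_cons_of_neg (by simp only [beq_iff_eq]; exact hq),
              List.find?_cons_of_neg (by simp only [beq_iff_eq]; omega)]
          rw [List.find?_cons_of_neg (by simp only [beq_iff_eq]; exact hq)] at ih'
          exact ih'

-- values of pvPs are the flattened array
lemma pvVals_aux (L : List (List Int)) (s : Int) :
    ((PySem.List.enumerate L s).flatMap
      (fun r => (PySem.List.enumerate r.2 0).map (fun c => ((r.1, c.1), c.2)))).map (·.2)
      = L.flatMap id := by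
  induction L generalizing s with
  | nil => simp [PySem.List.enumerate_nil]
  | cons row L ih =>
      rw [PySem.List.enumerate_cons]
      simp only [List.flatMap_cons, List.map_append, List.map_map]
      congr 1
      · have hcomp : ((fun (x : (Int × Int) × Int) => x.2) ∘ fun (c : Int × Int) => ((s, c.1), c.2))
            = (fun (c : Int × Int) => c.2) := rfl
        rw [hcomp]
        exact PySem.List.map_snd_enumerate row 0
      · exact ih (s + 1)

lemma pvPs_vals (array : List (List Int)) :
    (pvPs array).map (·.2) = array.flatMap id := pvVals_aux array 0

-- one row's segment of pvPs
lemma pvSeg_find_none (i : Int) (row : List Int) (m : Int) (hm : m ∉ row) :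
    ((PySem.List.enumerate row 0).map (fun c => ((i, c.1), c.2))).find?
      (fun p => p.2 == m) = none := by
  rw [List.find?_eq_none]
  intro p hp
  simp only [List.mem_map] at hp
  obtain ⟨c, hc, rfl⟩ := hp
  have : c.2 ∈ row := by
    have := List.mem_map_of_mem (f := (·.2)) hc
    rwa [PySem.List.map_snd_enumerate] at this
  simp only [beq_iff_eq]
  intro h; exact hm (h ▸ this)

lemma pvSeg_find_mem (i : Int) (row : List Int) (m : Int) (hm : m ∈ row) :
    ((PySem.List.enumerate row 0).map (fun c => ((i, c.1), c.2))).find?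
      (fun p => p.2 == m) = some ((i, (((PySem.List.index? row m).getD 0 : Nat) : Int)), m) := by
  obtain ⟨k, hk⟩ := (PySem.List.index?_isSome_iff row m).mpr hm |> Option.isSome_iff_exists.mp
  obtain ⟨pre, suf, hrow, hlen, hpre⟩ := (PySem.List.index?_eq_some_iff row m k).mp hk
  rw [hk]; simp only [Option.getD_some]
  subst hrow
  rw [PySem.List.enumerate_append, List.map_append, List.find?_append]
  have hnone : ((PySem.List.enumerate pre 0).map (fun c => ((i, c.1), c.2))).find?
      (fun p => p.2 == m) = none := pvSeg_find_none i pre m hpre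
  rw [hnone]
  rw [PySem.List.enumerate_cons]
  simp [hlen]

lemma pvFindRow_eq (m : Int) (L : List (Int × List Int)) :
    findRow m L =
      (match (L.flatMap (fun r => (PySem.List.enumerate r.2 0).map
          (fun c => ((r.1, c.1), c.2)))).find? (fun p => p.2 == m) with
        | some q => q.1.1 == q.1.2
        | none => true) := by
  induction L with
  | nil => rfl
  | cons r L ih =>
      simp only [List.flatMap_cons, List.find?_append]
      by_cases hmem : m ∈ r.2
      · rw [pvSeg_find_mem r.1 r.2 m hmem]
        simp [findRow, hmem]
      · rw [pvSeg_find_none r.1 r.2 m hmem]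
        simp only [Option.none_or]
        rw [findRow, if_neg hmem]
        exact ih

lemma pvPs_nil_iff (array : List (List Int)) :
    pvPs array = [] ↔ array.flatMap id = [] := by
  constructor
  · intro h
    rw [← pvPs_vals, h]; rfl
  · intro h
    have := pvPs_vals array
    rw [h, List.map_eq_nil_iff] at this
    exact this

-- ===== VERDICT (by name: the statement is the Claim_ definition above) =====
theorem f_spec : Claim_equal_f := by
  intro array _
  unfold Spec_f
  rw [pvF_eq]
  simp only [f_alt]
  cases hps : pvPs array with
  | nil =>
      have hv : array.flatMap id = [] := (pvPs_nil_iff array).mp hps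
      simp [hv, PySem.List.min?]
  | cons q l =>
      have hv : array.flatMap id = q.2 :: l.map (·.2) := by
        rw [← pvPs_vals, hps]; rfl
      rw [hv, PySem.List.min?_id_cons]
      have hmin : (l.map (·.2)).foldl min q.2 = pvVmin q.2 l := by
        simp [pvVmin, List.foldl_map]
      rw [hmin]
      have hfr := pvFindRow_eq (pvVmin q.2 l) (PySem.List.enumerate array 0)
      have hps' : (PySem.List.enumerate array 0).flatMap
          (fun r => (PySem.List.enumerate r.2 0).map (fun c => ((r.1, c.1), c.2))) = pvPs array := rfl
      rw [hps', hps, pvFind_char] at hfr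
      simp only [hfr]
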